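-- pv_equiv track=rewrite | github.com/MrBrantCode/unitest_baseline | mut_generate/mist_train_taco/taco_13881/solution.py | max_good_indices
-- ===== SOURCE A (Python) =====
-- def max_good_indices(A: list) -> int:
--     """
--     Determines the maximum number of good indices Chef can get after performing the given operation at most once.
--
--     Parameters:
--     A (list): The array of integers.
--
--     Returns:
--     int: The maximum number of good indices.
--     """
--     freq = {}
--     for i in A:
--         if i in freq.keys():
--             freq[i] += 1
--         else:
--             freq[i] = 1
--     A = [*freq.keys()]
--     A.sort()
--     max_count = sum((freq[x] for x in freq if freq[x] > 1))
--     for x in range(1, A[-1] - A[0] + 1):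
--         (s, p, count) = ([], {}, 0)
--         for i in A:
--             if i - x in freq:
--                 p[i] = p[i - x]
--             else:
--                 p[i] = len(s)
--                 s.append([])
--             s[p[i]].append(freq[i])
--         for v in s:
--             count += sum(v)
--             v.sort()
--             if len(v) & 1 and v[-1] == 1:
--                 count -= 1
--         max_count = max(max_count, count)
--     return max_count
-- ===== SOURCE B (Python) =====
-- def max_good_indices(A: list) -> int:
--     """
--     Maximum number of good indices after performing the operation at most once.
--
--     One pass per candidate x: chains are tracked by a per-chain pair of
--     aggregates (odd length, all frequencies equal 1) instead of materialising,
--     sorting and re-scanning each chain's frequency list; the count is n minus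
--     the number of bad chains.
--     """
--     n = len(A)
--     freq = {}
--     for v in A:
--         freq[v] = freq.get(v, 0) + 1
--     vals = sorted(freq)
--     best = n - sum(1 for v in vals if freq[v] == 1)
--     for x in range(1, vals[-1] - vals[0] + 1):
--         p = {}
--         stats = []  # per chain: [odd_length, all_freqs_one]
--         for v in vals:
--             j = p.get(v - x)
--             if j is None:
--                 j = len(stats)
--                 stats.append([False, True])
--             p[v] = j
--             st = stats[j]
--             st[0] = not st[0]
--             st[1] = st[1] and freq[v] == 1
--         bad = sum(1 for odd, ones in stats if odd and ones)
--         best = max(best, n - bad)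
--     return best
-- ===== Notes on version B (the rewrite author's own statement) =====
-- stated objective: alternative
-- what changed: Per candidate x, B replaces A's chain-id dict plus list-of-frequency-lists (each later sorted and re-scanned for parity/last==1) by a single pass keeping only two aggregates per chain (odd length, all frequencies equal 1), and computes the count as len(A) minus the number of bad chains; the baseline is n minus the number of unique values.
import Mathlib
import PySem

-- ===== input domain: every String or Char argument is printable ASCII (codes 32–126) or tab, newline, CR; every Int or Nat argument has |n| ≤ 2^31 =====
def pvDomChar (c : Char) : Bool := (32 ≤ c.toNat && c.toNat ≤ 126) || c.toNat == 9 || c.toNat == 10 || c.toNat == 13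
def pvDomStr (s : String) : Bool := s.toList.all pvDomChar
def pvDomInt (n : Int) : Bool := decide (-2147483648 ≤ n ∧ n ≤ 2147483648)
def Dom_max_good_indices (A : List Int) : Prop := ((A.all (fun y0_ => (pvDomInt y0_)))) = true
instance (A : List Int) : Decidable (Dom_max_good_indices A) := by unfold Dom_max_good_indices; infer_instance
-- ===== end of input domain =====

-- B replaces A's per-x chain lists (materialised, sorted, re-scanned) by two per-chain
-- aggregates maintained in one pass, counting `n - bad chains`; objective: alternative.

-- ===== PORT A =====
-- one iteration of A's `for i in A:` chain-collection loop; state = (s, p)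
def mgiStepA (freq : PySem.Dict Int Int) (x : Int)
    (sp : List (List Int) × PySem.Dict Int Nat) (i : Int) :
    List (List Int) × PySem.Dict Int Nat :=
  if freq.contains (i - x) then
    -- p[i] = p[i - x]; s[p[i]].append(freq[i])   (the key i - x is always present here,
    -- since A iterates the sorted distinct values and x ≥ 1: the default 0 is never used)
    let j := sp.2.getD (i - x) 0
    (sp.1.modify j (fun v => v ++ [freq.getD i 0]), sp.2.insert i j)
  else
    -- p[i] = len(s); s.append([]); s[p[i]].append(freq[i])
    (sp.1 ++ [[freq.getD i 0]], sp.2.insert i sp.1.length)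

-- body of A's `for v in s:` counting loop
def mgiBodyA (count : Int) (v : List Int) : Int :=
  let count := count + v.sum
  let v' := PySem.List.sorted v (fun y => y) false
  if PySem.Int.band (v'.length : Int) 1 ≠ 0 ∧ PySem.List.pyGetD v' (-1) 0 = 1 then
    count - 1
  else count

-- A's `for v in s:` counting loop
def mgiCountA (s : List (List Int)) : Int :=
  s.foldl mgiBodyA 0

def mgiInnerA (freq : PySem.Dict Int Int) (vals : List Int) (x : Int) : Int :=
  mgiCountA (vals.foldl (mgiStepA freq x) ([], PySem.Dict.empty)).1

def max_good_indices (A : List Int) : Int :=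
  let freq := A.foldl (fun d i => if d.contains i then d.modify i 0 (· + 1) else d.insert i 1)
    PySem.Dict.empty
  let A' := PySem.List.sorted freq.keys (fun y => y) false
  let maxCount := ((freq.keys.filter (fun k => decide (1 < freq.getD k 0))).map
    (fun k => freq.getD k 0)).sum
  -- the last/first-element accesses raise IndexError on the empty list: Pre_ excludes it; the default 0 is never used under Pre_
  (PySem.List.pyRange 1 (PySem.List.pyGetD A' (-1) 0 - PySem.List.pyGetD A' 0 0 + 1) 1).foldl
    (fun mc x => max mc (mgiInnerA freq A' x)) maxCount

-- ===== PORT B =====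
-- one iteration of B's `for v in vals:` loop; state = (p, stats)
def mgiStepB (freq : PySem.Dict Int Int) (x : Int)
    (ps : PySem.Dict Int Nat × List (Bool × Bool)) (v : Int) :
    PySem.Dict Int Nat × List (Bool × Bool) :=
  let js :=
    match ps.1.get? (v - x) with
    | some j => (j, ps.2)
    | none => (ps.2.length, ps.2 ++ [(false, true)])
  (ps.1.insert v js.1,
   js.2.modify js.1 (fun st => (!st.1, st.2 && decide (freq.getD v 0 = 1))))

def mgiInnerB (freq : PySem.Dict Int Int) (vals : List Int) (x : Int) : Int :=
  let stats := (vals.foldl (mgiStepB freq x) (PySem.Dict.empty, [])).2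
  ((stats.filter (fun st => st.1 && st.2)).length : Int)

def max_good_indices_alt (A : List Int) : Int :=
  let n : Int := A.length
  let freq := A.foldl (fun d v => d.insert v (d.getD v 0 + 1)) PySem.Dict.empty
  let vals := PySem.List.sorted freq.keys (fun y => y) false
  let best := n - ((vals.filter (fun v => decide (freq.getD v 0 = 1))).length : Int)
  -- the last/first-element accesses raise IndexError on the empty list, exactly as in A
  (PySem.List.pyRange 1 (PySem.List.pyGetD vals (-1) 0 - PySem.List.pyGetD vals 0 0 + 1) 1).foldl
    (fun best x => max best (n - mgiInnerB freq vals x)) best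

-- ===== PRECONDITION & SPEC =====
-- Python A indexes the last of the sorted distinct values: on the empty list it raises IndexError.
def Pre_max_good_indices (A : List Int) : Prop := A ≠ []
instance (A : List Int) : Decidable (Pre_max_good_indices A) := by
  unfold Pre_max_good_indices; infer_instance

def pvWitness_max_good_indices : List Int := [1, 2, 2]

def Spec_max_good_indices (A : List Int) (out : Int) : Prop := out = max_good_indices_alt A
instance (A : List Int) (out : Int) : Decidable (Spec_max_good_indices A out) := by
  unfold Spec_max_good_indices; infer_instance

-- ===== CLAIM (what is proved, stated in full; the proofs are below) =====
def Claim_equal_max_good_indices : Prop := ∀ (A : List Int), Dom_max_good_indices A →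
  Pre_max_good_indices A → Spec_max_good_indices A (max_good_indices A)

-- ===== LEMMAS AND PROOFS =====

-- the two aggregates B keeps for a chain, as a function of A's list for that chain
def mgiStat (v : List Int) : Bool × Bool :=
  (decide (v.length % 2 = 1), v.all (fun c => decide (c = 1)))

lemma mgi_map_modify {α β : Type} (f : α → β) (g : α → α) (h : β → β)
    (hfg : ∀ a, f (g a) = h (f a)) :
    ∀ (l : List α) (j : Nat), (l.modify j g).map f = (l.map f).modify j h := by
  intro l
  induction l with
  | nil => intro j; simp
  | cons a t ih =>
    intro j
    cases j with
    | zero => simp [List.modify_zero_cons, hfg]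
    | succ j => simp [List.modify_succ_cons, ih j]

lemma mgi_modify_append {α : Type} (l : List α) (a : α) (g : α → α) :
    (l ++ [a]).modify l.length g = l ++ [g a] := by
  induction l with
  | nil => simp [List.modify_zero_cons]
  | cons b t ih => simpa [List.modify_succ_cons] using ih

lemma mgi_stat_append (v : List Int) (c : Int) :
    mgiStat (v ++ [c]) = (!(mgiStat v).1, (mgiStat v).2 && decide (c = 1)) := by
  simp only [mgiStat, List.all_append, List.length_append, List.all_cons, List.all_nil,
    List.length_cons, List.length_nil, Prod.mk.injEq]
  constructor
  · rcases Nat.mod_two_eq_zero_or_one v.length with h | h <;>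
      simp [Nat.add_mod, h]
  · simp

-- joint loop invariant: B's state is A's state under mgiStat
lemma mgi_states (freq : PySem.Dict Int Int) (x : Int) (hx : 1 ≤ x) (rest : List Int) :
    ∀ (pre : List Int) (s : List (List Int)) (p : PySem.Dict Int Nat),
    (pre ++ rest).Pairwise (· < ·) →
    (∀ v : Int, freq.contains v = true ↔ v ∈ pre ++ rest) →
    (∀ v : Int, (p.get? v).isSome = true ↔ v ∈ pre) →
    rest.foldl (mgiStepB freq x) (p, s.map mgiStat)
      = ((rest.foldl (mgiStepA freq x) (s, p)).2,
         (rest.foldl (mgiStepA freq x) (s, p)).1.map mgiStat) := by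
  induction rest with
  | nil => intro pre s p _ _ _; simp
  | cons i rest ih =>
    intro pre s p hsorted hkeys hp
    have hlt : ∀ z ∈ rest, i < z :=
      (List.pairwise_cons.mp (List.pairwise_append.mp hsorted).2.1).1
    have hmem : i - x ∈ pre ++ i :: rest ↔ i - x ∈ pre := by
      constructor
      · intro hm
        rcases List.mem_append.mp hm with hm | hm
        · exact hm
        · rcases List.mem_cons.mp hm with hm | hm
          · omega
          · have := hlt _ hm; omega
      · exact fun hm => List.mem_append_left _ hm
    have hcont : freq.contains (i - x) = true ↔ i - x ∈ pre := (hkeys _).trans hmem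
    have hpsome : (p.get? (i - x)).isSome = true ↔ i - x ∈ pre := hp _
    have hsorted' : (pre ++ [i] ++ rest).Pairwise (· < ·) := by
      rwa [← List.append_cons]
    have hkeys' : ∀ v : Int, freq.contains v = true ↔ v ∈ pre ++ [i] ++ rest := by
      intro v; rw [← List.append_cons]; exact hkeys v
    by_cases hcx : i - x ∈ pre
    · obtain ⟨j, hj⟩ := Option.isSome_iff_exists.mp (hpsome.mpr hcx)
      have hgd : p.getD (i - x) 0 = j := by
        rw [PySem.Dict.getD_eq_get?_getD, hj]; rfl
      have hA : mgiStepA freq x (s, p) i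
          = (s.modify j (fun v => v ++ [freq.getD i 0]), p.insert i j) := by
        simp [mgiStepA, hcont.mpr hcx, hgd]
      have hB : mgiStepB freq x (p, s.map mgiStat) i
          = (p.insert i j,
             (s.modify j (fun v => v ++ [freq.getD i 0])).map mgiStat) := by
        simp only [mgiStepB, hj]
        rw [mgi_map_modify mgiStat (fun v => v ++ [freq.getD i 0])
          (fun st => (!st.1, st.2 && decide (freq.getD i 0 = 1)))
          (fun v => mgi_stat_append v (freq.getD i 0))]
      rw [List.foldl_cons, List.foldl_cons, hA, hB]
      exact ih (pre ++ [i]) _ _ hsorted' hkeys' (by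
        intro v
        rw [PySem.Dict.get?_insert]
        by_cases hv : v = i <;> simp [hv, hp v])
    · have hnone : p.get? (i - x) = none := by
        rcases h : p.get? (i - x) with _ | j
        · rfl
        · exact absurd (hpsome.mp (by rw [h]; rfl)) hcx
      have hA : mgiStepA freq x (s, p) i
          = (s ++ [[freq.getD i 0]], p.insert i s.length) := by
        have hcf : freq.contains (i - x) = false := by
          rcases h : freq.contains (i - x) with _ | _
          · rfl
          · exact absurd (hcont.mp h) hcx
        simp [mgiStepA, hcf]
      have hB : mgiStepB freq x (p, s.map mgiStat) i
          = (p.insert i s.length, (s ++ [[freq.getD i 0]]).map mgiStat) := by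
        simp only [mgiStepB, hnone]
        have hmod : (s.map mgiStat ++ [(false, true)]).modify (s.map mgiStat).length
            (fun st => (!st.1, st.2 && decide (freq.getD i 0 = 1)))
            = s.map mgiStat ++ [(true, decide (freq.getD i 0 = 1))] := by
          rw [mgi_modify_append]; simp
        rw [hmod]
        simp [mgiStat]
      rw [List.foldl_cons, List.foldl_cons, hA, hB]
      exact ih (pre ++ [i]) _ _ hsorted' hkeys' (by
        intro v
        rw [PySem.Dict.get?_insert]
        by_cases hv : v = i <;> simp [hv, hp v])

lemma mgi_sum_map_modify (c : Int) :
    ∀ (s : List (List Int)) (j : Nat), j < s.length →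
    ((s.modify j (· ++ [c])).map List.sum).sum = (s.map List.sum).sum + c := by
  intro s
  induction s with
  | nil => intro j hj; simp at hj
  | cons a t ih =>
    intro j hj
    cases j with
    | zero => simp [List.modify_zero_cons]; ring
    | succ j =>
      have := ih j (by simpa using hj)
      simp [List.modify_succ_cons, this]; ring

lemma mgi_mem_modify_append {l' : List Int} (c : Int) :
    ∀ (s : List (List Int)) (j : Nat), l' ∈ s.modify j (· ++ [c]) →
    l' ∈ s ∨ ∃ l ∈ s, l' = l ++ [c] := by
  intro s
  induction s with
  | nil => intro j h; simp at h
  | cons a t ih =>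
    intro j h
    cases j with
    | zero =>
      rw [List.modify_zero_cons] at h
      rcases List.mem_cons.mp h with h | h
      · exact Or.inr ⟨a, by simp, h⟩
      · exact Or.inl (List.mem_cons_of_mem _ h)
    | succ j =>
      rw [List.modify_succ_cons] at h
      rcases List.mem_cons.mp h with h | h
      · exact Or.inl (h ▸ List.mem_cons_self)
      · rcases ih j h with h | ⟨l, hl, he⟩
        · exact Or.inl (List.mem_cons_of_mem _ h)
        · exact Or.inr ⟨l, List.mem_cons_of_mem _ hl, he⟩

-- A-side loop invariant: chain lists hold frequencies (≥ 1) and their total sum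
lemma mgi_sprops (freq : PySem.Dict Int Int) (x : Int) (hx : 1 ≤ x) (rest : List Int) :
    ∀ (pre : List Int) (s : List (List Int)) (p : PySem.Dict Int Nat),
    (pre ++ rest).Pairwise (· < ·) →
    (∀ v : Int, freq.contains v = true ↔ v ∈ pre ++ rest) →
    (∀ v : Int, (p.get? v).isSome = true ↔ v ∈ pre) →
    (∀ (v : Int) (j : Nat), p.get? v = some j → j < s.length) →
    (∀ l ∈ s, ∀ c ∈ l, 1 ≤ c) →
    (∀ v ∈ rest, 1 ≤ freq.getD v 0) →
    (∀ l ∈ (rest.foldl (mgiStepA freq x) (s, p)).1, ∀ c ∈ l, 1 ≤ c) ∧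
    (((rest.foldl (mgiStepA freq x) (s, p)).1.map List.sum).sum
      = (s.map List.sum).sum + (rest.map (fun v => freq.getD v 0)).sum) := by
  induction rest with
  | nil => intro pre s p _ _ _ _ hpos _; exact ⟨hpos, by simp⟩
  | cons i rest ih =>
    intro pre s p hsorted hkeys hp hpj hpos hfreq
    have hlt : ∀ z ∈ rest, i < z :=
      (List.pairwise_cons.mp (List.pairwise_append.mp hsorted).2.1).1
    have hmem : i - x ∈ pre ++ i :: rest ↔ i - x ∈ pre := by
      constructor
      · intro hm
        rcases List.mem_append.mp hm with hm | hm
        · exact hm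
        · rcases List.mem_cons.mp hm with hm | hm
          · omega
          · have := hlt _ hm; omega
      · exact fun hm => List.mem_append_left _ hm
    have hcont : freq.contains (i - x) = true ↔ i - x ∈ pre := (hkeys _).trans hmem
    have hsorted' : (pre ++ [i] ++ rest).Pairwise (· < ·) := by rwa [← List.append_cons]
    have hkeys' : ∀ v : Int, freq.contains v = true ↔ v ∈ pre ++ [i] ++ rest := by
      intro v; rw [← List.append_cons]; exact hkeys v
    have hcpos : 1 ≤ freq.getD i 0 := hfreq i (by simp)
    have hfreq' : ∀ v ∈ rest, 1 ≤ freq.getD v 0 := fun v hv => hfreq v (by simp [hv])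
    by_cases hcx : i - x ∈ pre
    · obtain ⟨j, hj⟩ := Option.isSome_iff_exists.mp ((hp _).mpr hcx)
      have hjlt : j < s.length := hpj _ _ hj
      have hgd : p.getD (i - x) 0 = j := by
        rw [PySem.Dict.getD_eq_get?_getD, hj]; rfl
      have hA : mgiStepA freq x (s, p) i
          = (s.modify j (fun v => v ++ [freq.getD i 0]), p.insert i j) := by
        simp [mgiStepA, hcont.mpr hcx, hgd]
      rw [List.foldl_cons, hA]
      have hrec := ih (pre ++ [i]) (s.modify j (fun v => v ++ [freq.getD i 0]))
        (p.insert i j) hsorted' hkeys'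
        (by intro v
            rw [PySem.Dict.get?_insert]
            by_cases hv : v = i <;> simp [hv, hp v])
        (by intro v j' hj'
            rw [PySem.Dict.get?_insert] at hj'
            rw [List.length_modify]
            split at hj'
            · cases hj'; exact hjlt
            · exact hpj _ _ hj')
        (by intro l hl cc hcc
            rcases mgi_mem_modify_append (freq.getD i 0) s j hl with hl | ⟨l0, hl0, rfl⟩
            · exact hpos l hl cc hcc
            · rcases List.mem_append.mp hcc with hcc | hcc
              · exact hpos l0 hl0 cc hcc
              · simp at hcc; omega)
        hfreq'
      refine ⟨hrec.1, ?_⟩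
      rw [hrec.2, mgi_sum_map_modify (freq.getD i 0) s j hjlt]
      simp; ring
    · have hA : mgiStepA freq x (s, p) i
          = (s ++ [[freq.getD i 0]], p.insert i s.length) := by
        have hcf : freq.contains (i - x) = false := by
          rcases h : freq.contains (i - x) with _ | _
          · rfl
          · exact absurd (hcont.mp h) hcx
        simp [mgiStepA, hcf]
      rw [List.foldl_cons, hA]
      have hrec := ih (pre ++ [i]) (s ++ [[freq.getD i 0]]) (p.insert i s.length)
        hsorted' hkeys'
        (by intro v
            rw [PySem.Dict.get?_insert]
            by_cases hv : v = i <;> simp [hv, hp v])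
        (by intro v j' hj'
            rw [PySem.Dict.get?_insert] at hj'
            simp only [List.length_append, List.length_cons, List.length_nil]
            split at hj'
            · cases hj'; omega
            · have := hpj _ _ hj'; omega)
        (by intro l hl cc hcc
            rcases List.mem_append.mp hl with hl | hl
            · exact hpos l hl cc hcc
            · simp at hl; subst hl; simp at hcc; omega)
        hfreq'
      refine ⟨hrec.1, ?_⟩
      rw [hrec.2]
      simp; ring

-- A's bad-chain test, computed on the sorted copy, is B's pair of aggregates
lemma mgi_bad_iff (v : List Int) (hpos : ∀ c ∈ v, 1 ≤ c) :
    (PySem.Int.band ((PySem.List.sorted v (fun y => y) false).length : Int) 1 ≠ 0 ∧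
      PySem.List.pyGetD (PySem.List.sorted v (fun y => y) false) (-1) 0 = 1)
      ↔ ((mgiStat v).1 && (mgiStat v).2) = true := by
  have hband : ∀ (m : Nat), PySem.Int.band (m : Int) 1 ≠ 0 ↔ m % 2 = 1 := by
    intro m
    have h1 : PySem.Int.band (m : Int) ((1 : Nat) : Int) = ((m &&& 1 : Nat) : Int) :=
      PySem.Int.band_natCast m 1
    simp only [Nat.cast_one] at h1
    rw [h1, Nat.and_one_is_mod]
    omega
  rcases eq_or_ne v [] with rfl | hne
  · have h0 : PySem.List.sorted ([] : List Int) (fun y => y) false = [] :=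
      (PySem.List.sorted_eq_nil_iff _ _ _).mpr rfl
    rw [h0]
    simp only [List.length_nil, Nat.cast_zero, mgiStat]
    constructor
    · rintro ⟨h1, -⟩
      exact absurd (by decide : PySem.Int.band (0 : Int) 1 = 0) h1
    · intro h; simp at h
  · have hne' : PySem.List.sorted v (fun y => y) false ≠ [] := by
      rw [Ne, PySem.List.sorted_eq_nil_iff]; exact hne
    rw [PySem.List.pyGetD_neg_one _ 0 hne', PySem.List.length_sorted]
    have hmemv : ∀ y : Int, y ∈ PySem.List.sorted v (fun y => y) false ↔ y ∈ v :=
      fun y => PySem.List.mem_sorted v _ _ y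
    have hlast : (PySem.List.sorted v (fun y => y) false).getLast hne' = 1
        ↔ (∀ y ∈ v, y = 1) := by
      constructor
      · intro h y hy
        have hy' : y ∈ PySem.List.sorted v (fun y => y) false := (hmemv y).mpr hy
        obtain ⟨k, hk, rfl⟩ := List.mem_iff_getElem.mp hy'
        have hmono := PySem.List.sorted_id_getElem_mono v
          (p := k) (q := (PySem.List.sorted v (fun y => y) false).length - 1)
          (by omega) (by omega)
        rw [List.getLast_eq_getElem] at h
        rw [h] at hmono
        have h1 : 1 ≤ (PySem.List.sorted v (fun y => y) false)[k] :=
          hpos _ ((hmemv _).mp (List.getElem_mem hk))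
        omega
      · intro h
        exact h _ ((hmemv _).mp (List.getLast_mem hne'))
    constructor
    · rintro ⟨h1, h2⟩
      simp only [mgiStat, Bool.and_eq_true, decide_eq_true_eq, List.all_eq_true]
      exact ⟨(hband v.length).mp h1, fun c hc => hlast.mp h2 c hc⟩
    · intro h
      simp only [mgiStat, Bool.and_eq_true, decide_eq_true_eq, List.all_eq_true] at h
      exact ⟨(hband v.length).mpr h.1, hlast.mpr h.2⟩

lemma mgi_bodyA_eq (count : Int) (v : List Int) :
    mgiBodyA count v
      = if (PySem.Int.band ((PySem.List.sorted v (fun y => y) false).length : Int) 1 ≠ 0 ∧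
          PySem.List.pyGetD (PySem.List.sorted v (fun y => y) false) (-1) 0 = 1) then
        count + v.sum - 1
      else count + v.sum := by
  simp only [mgiBodyA]

lemma mgi_countA_from :
    ∀ (s : List (List Int)), (∀ l ∈ s, ∀ c ∈ l, 1 ≤ c) → ∀ (acc : Int),
    s.foldl mgiBodyA acc
    = acc + (s.map List.sum).sum
      - ((s.filter (fun l => (mgiStat l).1 && (mgiStat l).2)).length : Int) := by
  intro s
  induction s with
  | nil => intro _ acc; simp
  | cons v t ih =>
    intro hpos acc
    have hposv : ∀ c ∈ v, 1 ≤ c := hpos v (by simp)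
    have hpost : ∀ l ∈ t, ∀ c ∈ l, 1 ≤ c := fun l hl => hpos l (by simp [hl])
    rw [List.foldl_cons, ih hpost, mgi_bodyA_eq]
    rcases h : ((mgiStat v).1 && (mgiStat v).2) with _ | _
    · rw [if_neg (by rw [mgi_bad_iff v hposv, h]; simp)]
      simp [h]
      ring
    · rw [if_pos ((mgi_bad_iff v hposv).mpr h)]
      simp [h]
      ring

lemma mgi_countA_eq (s : List (List Int)) (hpos : ∀ l ∈ s, ∀ c ∈ l, 1 ≤ c) :
    mgiCountA s = (s.map List.sum).sum
      - ((s.filter (fun l => (mgiStat l).1 && (mgiStat l).2)).length : Int) := by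
  have := mgi_countA_from s hpos 0
  simpa [mgiCountA] using this

-- the sum of the multiplicities of the distinct values is the length of the list
lemma mgi_sum_counts (A : List Int) :
    ((PySem.Set.ofList A).map (fun v => (PySem.Dict.counter A).getD v 0)).sum
      = (A.length : Int) := by
  have hperm : (PySem.Set.ofList A).Perm A.dedup := by
    rw [List.perm_ext_iff_of_nodup (PySem.Set.nodup_ofList A) A.nodup_dedup]
    intro a; rw [PySem.Set.mem_ofList, List.mem_dedup]
  have h1 : ((PySem.Set.ofList A).map (fun v => (PySem.Dict.counter A).getD v 0)).sum
      = (A.dedup.map (fun v => (PySem.Dict.counter A).getD v 0)).sum :=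
    (hperm.map _).sum_eq
  rw [h1]
  have h2 : (A.dedup.map (fun v => (PySem.Dict.counter A).getD v 0))
      = A.dedup.map (fun v => ((A.count v : Nat) : Int)) := by
    apply List.map_congr_left
    intro v _
    rw [PySem.Dict.getD_counter]
  rw [h2]
  have h3 : A.dedup.map (fun v => ((A.count v : Nat) : Int))
      = (A.dedup.map (fun v => A.count v)).map (fun n : Nat => (n : Int)) := by
    rw [List.map_map]; rfl
  rw [h3, ← Nat.cast_list_sum, List.sum_map_count_dedup_eq_length]

-- per-x agreement: A's chain count is n minus B's bad-chain count
lemma mgi_inner (A : List Int) (x : Int) (hx : 1 ≤ x) :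
    mgiInnerA (PySem.Dict.counter A)
        (PySem.List.sorted (PySem.Dict.counter A).keys (fun y => y) false) x
      = (A.length : Int) - mgiInnerB (PySem.Dict.counter A)
        (PySem.List.sorted (PySem.Dict.counter A).keys (fun y => y) false) x := by
  set freq := PySem.Dict.counter A with hfreqdef
  set vals := PySem.List.sorted freq.keys (fun y => y) false with hvals
  have hsorted : vals.Pairwise (· < ·) := by
    rw [hvals, hfreqdef, PySem.Dict.keys_counter]
    exact PySem.List.sorted_ofList_pairwise_lt A
  have hkeys : ∀ v : Int, freq.contains v = true ↔ v ∈ vals := by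
    intro v
    rw [hfreqdef, PySem.Dict.contains_counter, hvals, PySem.List.mem_sorted,
      hfreqdef, PySem.Dict.keys_counter, PySem.Set.mem_ofList]
    simp
  have hfreqpos : ∀ v ∈ vals, 1 ≤ freq.getD v 0 := by
    intro v hv
    have hvA : v ∈ A := by
      rw [hvals, PySem.List.mem_sorted, hfreqdef, PySem.Dict.keys_counter,
        PySem.Set.mem_ofList] at hv
      exact hv
    rw [hfreqdef, PySem.Dict.getD_counter]
    exact_mod_cast List.count_pos_iff.mpr hvA
  have hstates := mgi_states freq x hx vals [] [] PySem.Dict.empty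
    (by simpa using hsorted)
    (by intro v; simpa using hkeys v)
    (by intro v; simp [PySem.Dict.get?_empty])
  have hprops := mgi_sprops freq x hx vals [] [] PySem.Dict.empty
    (by simpa using hsorted)
    (by intro v; simpa using hkeys v)
    (by intro v; simp [PySem.Dict.get?_empty])
    (by intro v j h; rw [PySem.Dict.get?_empty] at h; cases h)
    (by intro l hl; simp at hl)
    hfreqpos
  have hsum : ((vals.foldl (mgiStepA freq x) ([], PySem.Dict.empty)).1.map List.sum).sum
      = (A.length : Int) := by
    rw [hprops.2]
    have hps : (vals.map (fun v => freq.getD v 0)).sum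
        = ((PySem.Set.ofList A).map (fun v => freq.getD v 0)).sum := by
      apply List.Perm.sum_eq
      apply List.Perm.map
      rw [hvals, hfreqdef, PySem.Dict.keys_counter]
      exact PySem.List.sorted_perm _ _ _
    rw [List.map_nil, List.sum_nil, zero_add, hps, hfreqdef, mgi_sum_counts]
  have hstats : (vals.foldl (mgiStepB freq x) (PySem.Dict.empty, [])).2
      = (vals.foldl (mgiStepA freq x) ([], PySem.Dict.empty)).1.map mgiStat := by
    have h0 : ([] : List (Bool × Bool)) = ([] : List (List Int)).map mgiStat := rfl
    rw [h0, hstates]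
  simp only [mgiInnerA, mgiInnerB]
  rw [mgi_countA_eq _ hprops.1, hstats, List.filter_map, List.length_map, hsum]
  have hcomp : ((fun st : Bool × Bool => st.1 && st.2) ∘ mgiStat)
      = fun l => (mgiStat l).1 && (mgiStat l).2 := rfl
  rw [hcomp]

lemma mgi_split (f : Int → Int) :
    ∀ l : List Int, (∀ k ∈ l, 1 ≤ f k) →
    ((l.filter (fun k => decide (1 < f k))).map f).sum
      = (l.map f).sum - ((l.filter (fun k => decide (f k = 1))).length : Int) := by
  intro l
  induction l with
  | nil => intro _; simp
  | cons k t ih =>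
    intro h
    have hk : 1 ≤ f k := h k (by simp)
    have ht := ih (fun k hk => h k (by simp [hk]))
    rcases eq_or_lt_of_le hk with he | hlt
    · rw [List.filter_cons, List.filter_cons,
        show (decide (1 < f k)) = false by simp only [decide_eq_false_iff_not]; omega,
        show (decide (f k = 1)) = true by simp only [decide_eq_true_eq]; omega]
      simp only [if_false, if_true, Bool.false_eq_true, List.length_cons, List.map_cons,
        List.sum_cons, ht]
      push_cast
      omega
    · rw [List.filter_cons, List.filter_cons,
        show (decide (1 < f k)) = true by simp only [decide_eq_true_eq]; omega,
        show (decide (f k = 1)) = false by simp only [decide_eq_false_iff_not]; omega]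
      simp only [if_false, if_true, Bool.false_eq_true, List.map_cons, List.sum_cons, ht]
      omega

-- the initial value: A's sum of multiplicities > 1 is n minus the number of unique values
lemma mgi_base (A : List Int) :
    (((PySem.Dict.counter A).keys.filter
        (fun k => decide (1 < (PySem.Dict.counter A).getD k 0))).map
      (fun k => (PySem.Dict.counter A).getD k 0)).sum
      = (A.length : Int)
        - (((PySem.List.sorted (PySem.Dict.counter A).keys (fun y => y) false).filter
            (fun v => decide ((PySem.Dict.counter A).getD v 0 = 1))).length : Int) := by
  have hpos : ∀ k ∈ (PySem.Dict.counter A).keys,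
      1 ≤ (PySem.Dict.counter A).getD k 0 := by
    intro k hk
    rw [PySem.Dict.keys_counter, PySem.Set.mem_ofList] at hk
    rw [PySem.Dict.getD_counter]
    exact_mod_cast List.count_pos_iff.mpr hk
  have hflen : ((PySem.List.sorted (PySem.Dict.counter A).keys (fun y => y) false).filter
        (fun v => decide ((PySem.Dict.counter A).getD v 0 = 1))).length
      = ((PySem.Dict.counter A).keys.filter
        (fun v => decide ((PySem.Dict.counter A).getD v 0 = 1))).length :=
    ((PySem.List.sorted_perm (PySem.Dict.counter A).keys _ _).filter _).length_eq
  have hsum : ((PySem.Dict.counter A).keys.map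
      (fun k => (PySem.Dict.counter A).getD k 0)).sum = (A.length : Int) := by
    rw [PySem.Dict.keys_counter, mgi_sum_counts]
  rw [hflen, mgi_split _ _ hpos, hsum]

lemma mgi_freqA (A : List Int) :
    A.foldl (fun d i => if d.contains i then d.modify i 0 (· + 1) else d.insert i 1)
      PySem.Dict.empty = PySem.Dict.counter A := by
  rw [PySem.Dict.counter_eq_foldl]
  apply PySem.List.foldl_congr_mem
  intro d i _
  rcases h : d.contains i with _ | _
  · simp only [Bool.false_eq_true, if_false, PySem.Dict.modify,
      PySem.Dict.getD_of_not_contains d 0 h]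
    norm_num
  · simp

-- ===== VERDICT (by name: the statement is the Claim_ definition above) =====
theorem max_good_indices_spec : Claim_equal_max_good_indices := by
  intro A _ _
  unfold Spec_max_good_indices max_good_indices max_good_indices_alt
  simp only [mgi_freqA, PySem.Dict.foldl_insert_getD_add_one_eq_counter]
  rw [mgi_base A]
  apply PySem.List.foldl_congr_mem
  intro mc x hx
  rw [mgi_inner A x (PySem.List.mem_pyRange_one.mp hx).1]
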